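-- pv_equiv track=rewrite | github.com/habichta/adventOfCode | 5/1.py | count_polymer
-- ===== SOURCE A (Python) =====
-- def count_polymer(data,ign=''):
--     stack = []
--     for c in data:
--         if c != ign.lower() and c != ign.upper():
--             stack.append(c)
--             if len(stack) > 1:
--                 x,y = stack[-1], stack[-2]
--                 while len(stack)> 1 and x != y and (x == y.upper() or x == y.lower()):
--                     del stack[-2:]
--                     if len(stack) > 1:
--                         x,y  = stack[-1],stack[-2]
--     return(len(stack))
-- ===== SOURCE B (Python) =====
-- def count_polymer(data, ign=''):
--     def react(c, d):
--         return c != d and (c == d.upper() or c == d.lower())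
--     units = [c for c in data if c != ign.lower() and c != ign.upper()]
--     changed = True
--     while changed:
--         out = []
--         i = 0
--         while i < len(units):
--             if i + 1 < len(units) and react(units[i], units[i + 1]):
--                 i += 2
--             else:
--                 out.append(units[i])
--                 i += 1
--         changed = len(out) != len(units)
--         units = out
--     return len(units)
-- ===== Notes on version B (the rewrite author's own statement) =====
-- stated objective: alternative
-- what changed: Replaces A's single stack pass (push each unit, pop-while the top pair reacts) by filtering once and then repeatedly making full left-to-right scans that delete every disjoint reacting adjacent pair, iterating to a fixed point; correctness rests on confluence of the reaction rewriting.
import Mathlib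
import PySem

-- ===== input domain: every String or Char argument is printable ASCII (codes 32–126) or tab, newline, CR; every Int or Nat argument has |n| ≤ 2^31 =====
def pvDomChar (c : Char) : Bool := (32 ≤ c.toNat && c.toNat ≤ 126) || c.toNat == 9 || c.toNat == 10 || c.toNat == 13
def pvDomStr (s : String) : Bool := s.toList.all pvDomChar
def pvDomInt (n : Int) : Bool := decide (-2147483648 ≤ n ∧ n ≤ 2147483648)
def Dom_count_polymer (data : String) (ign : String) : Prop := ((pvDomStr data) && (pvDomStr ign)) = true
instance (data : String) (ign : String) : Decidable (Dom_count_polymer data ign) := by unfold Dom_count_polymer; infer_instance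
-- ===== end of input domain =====

-- B replaces A's single stack pass by repeated full scans deleting reacting adjacent pairs until a
-- fixed point (alternative decomposition, same return value; B is not faster).

-- ===== PORT A =====
-- A's inner `while` loop: pop the top two stack entries while they react (A's exact test).
def popA : List Char → List Char
  | x :: y :: r =>
    if x ≠ y ∧ (x = PySem.Chars.upperChar y ∨ x = PySem.Chars.lowerChar y) then popA r
    else x :: y :: r
  | s => s
termination_by s => s.length
decreasing_by simp

def count_polymer (data : String) (ign : String) : Int :=
  ((data.toList.foldl (fun stack c =>
      if [c] ≠ PySem.Chars.lower ign.toList ∧ [c] ≠ PySem.Chars.upper ign.toList then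
        popA (c :: stack)
      else stack) []).length : Int)

-- ===== PORT B =====
def reactB (c d : Char) : Bool :=
  c != d && (c == PySem.Chars.upperChar d || c == PySem.Chars.lowerChar d)

-- one left-to-right scan: drop each reacting adjacent pair, keep everything else
def onePass : List Char → List Char
  | c :: d :: rest => if reactB c d then onePass rest else c :: onePass (d :: rest)
  | s => s
termination_by s => s.length
decreasing_by all_goals simp

-- needed by reduceFix's termination argument (cited in its decreasing_by)
theorem onePass_eq_or_lt (xs : List Char) : onePass xs = xs ∨ (onePass xs).length < xs.length := by
  induction xs using onePass.induct with
  | case1 c d rest hr ih =>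
    right
    rw [onePass, if_pos hr]
    rcases ih with h | h
    · rw [h]; simp
    · simp; omega
  | case2 c d rest hr ih =>
    rw [onePass, if_neg hr]
    rcases ih with h | h
    · left; rw [h]
    · right; simpa using h
  | case3 s h1 => left; rw [onePass]; exact h1

-- B's outer `while changed` loop (out = onePass u; loop again iff the length changed)
def reduceFix (u : List Char) : List Char :=
  if (onePass u).length ≠ u.length then reduceFix (onePass u) else onePass u
termination_by u.length
decreasing_by
  rename_i hne
  rcases onePass_eq_or_lt u with h | h
  · exact absurd (by rw [h]) hne
  · exact h

def count_polymer_alt (data : String) (ign : String) : Int :=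
  ((reduceFix (data.toList.filter (fun c =>
      decide ([c] ≠ PySem.Chars.lower ign.toList ∧ [c] ≠ PySem.Chars.upper ign.toList)))).length : Int)

-- ===== PRECONDITION & SPEC =====
def Spec_count_polymer (data : String) (ign : String) (out : Int) : Prop := out = count_polymer_alt data ign
instance (data : String) (ign : String) (out : Int) : Decidable (Spec_count_polymer data ign out) := by unfold Spec_count_polymer; infer_instance

-- ===== CLAIM (what is proved, stated in full; the proofs are below) =====
def Claim_equal_count_polymer : Prop := ∀ (data : String) (ign : String), Dom_count_polymer data ign → Spec_count_polymer data ign (count_polymer data ign)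

-- ===== LEMMAS AND PROOFS =====

theorem toNat_ofNat' (n : Nat) (h : n < 55296) : (Char.ofNat n).toNat = n := by
  have : Nat.isValidChar n := Or.inl (by omega)
  simp [Char.ofNat, this]

theorem char_eq_iff (a b : Char) : a = b ↔ a.toNat = b.toNat :=
  ⟨fun h => by rw [h], fun h => Char.ext (UInt32.toNat_inj.mp h)⟩

theorem islower_iff (y : Char) : PySem.Chars.islower y = true ↔ 97 ≤ y.toNat ∧ y.toNat ≤ 122 := by
  simp only [PySem.Chars.islower, Bool.and_eq_true, decide_eq_true_eq, Char.le_def,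
    UInt32.le_iff_toNat_le]
  exact Iff.rfl

theorem isupper_iff (y : Char) : PySem.Chars.isupper y = true ↔ 65 ≤ y.toNat ∧ y.toNat ≤ 90 := by
  simp only [PySem.Chars.isupper, Bool.and_eq_true, decide_eq_true_eq, Char.le_def,
    UInt32.le_iff_toNat_le]
  exact Iff.rfl

theorem upperChar_toNat (y : Char) :
    (PySem.Chars.upperChar y).toNat =
      if 97 ≤ y.toNat ∧ y.toNat ≤ 122 then y.toNat - 32 else y.toNat := by
  unfold PySem.Chars.upperChar PySem.Chars.islower
  rw [show (decide ('a' ≤ y) && decide (y ≤ 'z')) = PySem.Chars.islower y from rfl]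
  by_cases h : 97 ≤ y.toNat ∧ y.toNat ≤ 122
  · rw [if_pos ((islower_iff y).mpr h), if_pos h, toNat_ofNat' _ (by omega)]
  · rw [if_neg (fun hc => h ((islower_iff y).mp hc)), if_neg h]

theorem lowerChar_toNat (y : Char) :
    (PySem.Chars.lowerChar y).toNat =
      if 65 ≤ y.toNat ∧ y.toNat ≤ 90 then y.toNat + 32 else y.toNat := by
  unfold PySem.Chars.lowerChar PySem.Chars.isupper
  rw [show (decide ('A' ≤ y) && decide (y ≤ 'Z')) = PySem.Chars.isupper y from rfl]
  by_cases h : 65 ≤ y.toNat ∧ y.toNat ≤ 90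
  · rw [if_pos ((isupper_iff y).mpr h), if_pos h, toNat_ofNat' _ (by omega)]
  · rw [if_neg (fun hc => h ((isupper_iff y).mp hc)), if_neg h]

theorem reactB_true_iff (x y : Char) :
    reactB x y = true ↔ x ≠ y ∧ (x = PySem.Chars.upperChar y ∨ x = PySem.Chars.lowerChar y) := by
  simp [reactB]

-- numeric characterisation of A's and B's (identical) reaction test
theorem reactB_num (x y : Char) :
    reactB x y = true ↔
      (97 ≤ y.toNat ∧ y.toNat ≤ 122 ∧ x.toNat + 32 = y.toNat) ∨
      (65 ≤ y.toNat ∧ y.toNat ≤ 90 ∧ x.toNat = y.toNat + 32) := by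
  rw [reactB_true_iff, ne_eq, char_eq_iff x y,
    char_eq_iff x (PySem.Chars.upperChar y), char_eq_iff x (PySem.Chars.lowerChar y),
    upperChar_toNat, lowerChar_toNat]
  by_cases h1 : 97 ≤ y.toNat ∧ y.toNat ≤ 122 <;> by_cases h2 : 65 ≤ y.toNat ∧ y.toNat ≤ 90
  · rw [if_pos h1, if_pos h2]; omega
  · rw [if_pos h1, if_neg h2]; omega
  · rw [if_neg h1, if_pos h2]; omega
  · rw [if_neg h1, if_neg h2]; omega

theorem reactB_symm {x y : Char} (h : reactB x y = true) : reactB y x = true := by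
  rw [reactB_num] at h ⊢; omega

theorem reactB_false_symm {x y : Char} (h : reactB x y = false) : reactB y x = false := by
  cases hyx : reactB y x
  · rfl
  · rw [reactB_symm hyx] at h; cases h

theorem reactB_right_unique {a b c : Char} (h1 : reactB a b = true) (h2 : reactB a c = true) :
    b = c := by
  rw [reactB_num] at h1 h2
  rw [char_eq_iff]
  omega

-- A's pop-while loop condition is exactly reactB
theorem popA_cons_cons (x y : Char) (r : List Char) :
    popA (x :: y :: r) = if reactB x y then popA r else x :: y :: r := by
  rw [popA]
  by_cases h : x ≠ y ∧ (x = PySem.Chars.upperChar y ∨ x = PySem.Chars.lowerChar y)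
  · rw [if_pos h, if_pos ((reactB_true_iff x y).mpr h)]
  · rw [if_neg h, if_neg (by rw [reactB_true_iff]; exact h)]

theorem popA_nil : popA [] = [] := by rw [popA]; simp

theorem popA_one (x : Char) : popA [x] = [x] := by rw [popA]; simp

-- irreducible stacks (no adjacent reacting pair, top first)
def Irr (s : List Char) : Prop := List.IsChain (fun x y => reactB x y = false) s

theorem popA_irr {s : List Char} (h : Irr s) : popA s = s := by
  match s with
  | [] => exact popA_nil
  | [x] => exact popA_one x
  | x :: y :: r =>
    have hxy : reactB x y = false := (List.isChain_cons_cons.mp h).1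
    rw [popA_cons_cons, if_neg (by simp [hxy])]

theorem irr_popA_cons {s : List Char} (c : Char) (h : Irr s) : Irr (popA (c :: s)) := by
  match s with
  | [] => rw [popA_one]; exact List.IsChain.singleton c
  | t :: r =>
    rw [popA_cons_cons]
    by_cases hr : reactB c t = true
    · rw [if_pos hr]
      have hir : Irr r := h.of_cons
      rw [popA_irr hir]; exact hir
    · rw [if_neg hr]
      exact List.isChain_cons_cons.mpr ⟨by simpa using hr, h⟩

-- the key step: pushing a reacting pair onto an irreducible stack is a no-op
theorem push_push_react {s : List Char} {a b : Char} (hs : Irr s) (hab : reactB a b = true) :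
    popA (b :: popA (a :: s)) = s := by
  match s with
  | [] =>
    rw [popA_one, popA_cons_cons, if_pos (reactB_symm hab), popA_nil]
  | t :: r =>
    have hir : Irr r := hs.of_cons
    rw [popA_cons_cons]
    by_cases hat : reactB a t = true
    · rw [if_pos hat, popA_irr hir]
      have hbt : b = t := reactB_right_unique hab hat
      subst hbt
      exact popA_irr hs
    · rw [if_neg hat, popA_cons_cons, if_pos (reactB_symm hab), popA_irr hs]

-- one pass does not change the resulting stack
theorem foldl_push_onePass (xs : List Char) :
    ∀ s : List Char, Irr s →
      List.foldl (fun st c => popA (c :: st)) s (onePass xs) =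
      List.foldl (fun st c => popA (c :: st)) s xs := by
  induction xs using onePass.induct with
  | case1 c d rest hr ih =>
    intro s hs
    rw [onePass, if_pos hr, ih s hs]
    simp only [List.foldl_cons]
    rw [push_push_react hs hr]
  | case2 c d rest hr ih =>
    intro s hs
    rw [onePass, if_neg hr]
    simp only [List.foldl_cons]
    exact ih _ (irr_popA_cons c hs)
  | case3 s h1 => intro s' _; rw [onePass]; exact h1

theorem foldl_push_reduceFix (u : List Char) :
    List.foldl (fun st c => popA (c :: st)) [] (reduceFix u) =
    List.foldl (fun st c => popA (c :: st)) [] u := by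
  induction u using reduceFix.induct with
  | case1 u hne ih =>
    rw [reduceFix]
    simp only [if_pos hne]
    rw [ih, foldl_push_onePass u [] List.IsChain.nil]
  | case2 u hne =>
    rw [reduceFix]
    simp only [if_neg hne]
    exact foldl_push_onePass u [] List.IsChain.nil

theorem reduceFix_fix (u : List Char) : onePass (reduceFix u) = reduceFix u := by
  induction u using reduceFix.induct with
  | case1 u hne ih =>
    rw [reduceFix]; simp only [if_pos hne]; exact ih
  | case2 u hne =>
    rw [reduceFix]; simp only [if_neg hne]
    rcases onePass_eq_or_lt u with h | h
    · rw [h]; exact h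
    · exfalso; exact hne (by omega)

theorem fix_chain {u : List Char} (h : onePass u = u) :
    List.IsChain (fun x y => reactB x y = false) u := by
  induction u using onePass.induct with
  | case1 c d rest hr ih =>
    exfalso
    rw [onePass, if_pos hr] at h
    rcases onePass_eq_or_lt rest with h2 | h2
    · rw [h2] at h; have := congrArg List.length h; simp at this; omega
    · rw [h] at h2; simp at h2; omega
  | case2 c d rest hr ih =>
    rw [onePass, if_neg hr] at h
    have h2 : onePass (d :: rest) = d :: rest := by
      have := congrArg List.tail h; simpa using this
    exact List.isChain_cons_cons.mpr ⟨by simpa using hr, ih h2⟩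
  | case3 s hs =>
    match s with
    | [] => exact List.IsChain.nil
    | [x] => exact List.IsChain.singleton x
    | x :: y :: r => exact absurd rfl (fun hc => hs x y r hc)

-- folding the stack push over an already fully reduced list just reverses it
theorem foldl_push_of_chain (u : List Char) :
    ∀ s : List Char, List.IsChain (fun x y => reactB x y = false) u → Irr s →
      (∀ c t, u.head? = some c → s.head? = some t → reactB c t = false) →
      List.foldl (fun st c => popA (c :: st)) s u = u.reverse ++ s := by
  induction u with
  | nil => intro s _ _ _; simp
  | cons c rest ih =>
    intro s hu hs hh
    have hcs : Irr (c :: s) := by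
      match s with
      | [] => exact List.IsChain.singleton c
      | t :: r => exact List.isChain_cons_cons.mpr ⟨hh c t rfl rfl, hs⟩
    simp only [List.foldl_cons]
    rw [popA_irr hcs]
    rw [ih (c :: s) hu.of_cons hcs ?_]
    · simp
    · intro d t hd ht
      have ht' : c = t := by simpa using ht
      subst ht'
      cases rest with
      | nil => cases hd
      | cons d' rest' =>
        have hd' : d = d' := by simpa using hd.symm
        subst hd'
        exact reactB_false_symm (List.isChain_cons_cons.mp hu).1

-- the filter/ite bridge between the two ports' treatment of the ignored letter
theorem foldl_ite_filter (p : Char → Prop) [DecidablePred p] :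
    ∀ (l : List Char) (s : List Char),
      List.foldl (fun st c => if p c then popA (c :: st) else st) s l =
      List.foldl (fun st c => popA (c :: st)) s (l.filter (fun c => decide (p c))) := by
  intro l
  induction l with
  | nil => intro s; rfl
  | cons c rest ih =>
    intro s
    by_cases h : p c
    · simp [h, ih]
    · simp [h, ih]

-- ===== VERDICT (by name: the statement is the Claim_ definition above) =====
theorem count_polymer_spec : Claim_equal_count_polymer := by
  intro data ign _
  unfold Spec_count_polymer count_polymer count_polymer_alt
  rw [foldl_ite_filter (fun c => [c] ≠ PySem.Chars.lower ign.toList ∧ [c] ≠ PySem.Chars.upper ign.toList)]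
  set units := data.toList.filter (fun c =>
    decide ([c] ≠ PySem.Chars.lower ign.toList ∧ [c] ≠ PySem.Chars.upper ign.toList)) with hu
  rw [← foldl_push_reduceFix units]
  rw [foldl_push_of_chain (reduceFix units) [] (fix_chain (reduceFix_fix units))
      List.IsChain.nil (by intro c t _ ht; cases ht)]
  simp
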